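-- pv_equiv track=rewrite | github.com/aflynt/aoc | day_22/lib.py | find_right_bounds
-- ===== SOURCE A (Python) =====
-- def find_right_bounds(board, row):
--
--     icol = len(board[row])-1
--
--     while icol >= 0:
--
--         char = board[row][icol]
--         if char != ' ':
--             break
--         icol -= 1
--     return icol
-- ===== SOURCE B (Python) =====
-- def find_right_bounds(board, row):
--     last = -1
--     for i, ch in enumerate(board[row]):
--         if ch != ' ':
--             last = i
--     return last
-- ===== Notes on version B (the rewrite author's own statement) =====
-- stated objective: alternative
-- what changed: Replaces A's right-to-left while loop with early exit by a single left-to-right forward scan that keeps the last index at which a non-space character was seen in an accumulator.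
import Mathlib
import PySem

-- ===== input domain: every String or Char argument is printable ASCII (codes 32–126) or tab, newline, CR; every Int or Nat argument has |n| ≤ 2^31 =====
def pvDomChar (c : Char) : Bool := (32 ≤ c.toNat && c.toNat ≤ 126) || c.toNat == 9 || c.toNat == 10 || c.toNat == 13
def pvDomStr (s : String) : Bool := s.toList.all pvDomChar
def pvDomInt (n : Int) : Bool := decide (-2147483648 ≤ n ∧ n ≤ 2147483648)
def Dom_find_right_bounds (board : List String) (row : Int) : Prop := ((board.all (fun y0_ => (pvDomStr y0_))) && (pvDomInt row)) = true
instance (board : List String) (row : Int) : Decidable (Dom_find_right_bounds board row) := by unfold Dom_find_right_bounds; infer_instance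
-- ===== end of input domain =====

-- B replaces A's right-to-left while loop (with early exit) by a single left-to-right
-- forward scan keeping the last non-space index in an accumulator (alternative; same cost).

-- ===== PORT A =====
-- the while loop: argument n = icol + 1 (n = 0 means icol has become -1, return it)
def pvALoop (s : List Char) : Nat → Int
  | 0 => -1
  | n + 1 => if (PySem.List.pyGet? s (n : Int)).getD ' ' ≠ ' ' then (n : Int) else pvALoop s n

def find_right_bounds (board : List String) (row : Int) : Int :=
  match PySem.List.pyGet? board row with
  | none => -1  -- IndexError in Python; excluded by Pre_
  | some r => pvALoop r.toList r.toList.length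

-- ===== PORT B =====
-- forward scan: for i, ch in enumerate(board[row]): if ch != ' ': last = i
def find_right_bounds_alt (board : List String) (row : Int) : Int :=
  match PySem.List.pyGet? board row with
  | none => -1  -- IndexError in Python; excluded by Pre_
  | some r =>
    (PySem.List.enumerate r.toList 0).foldl
      (fun last p => if p.2 ≠ ' ' then p.1 else last) (-1)

-- ===== PRECONDITION & SPEC =====
-- Pre_ excludes exactly the rows on which board[row] raises IndexError
def Pre_find_right_bounds (board : List String) (row : Int) : Prop :=
  -(board.length : Int) ≤ row ∧ row < (board.length : Int)
instance (board : List String) (row : Int) : Decidable (Pre_find_right_bounds board row) := by unfold Pre_find_right_bounds; infer_instance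
def pvWitness_find_right_bounds : List String × Int := (["ab  ", "  "], 0)

def Spec_find_right_bounds (board : List String) (row : Int) (out : Int) : Prop := out = find_right_bounds_alt board row
instance (board : List String) (row : Int) (out : Int) : Decidable (Spec_find_right_bounds board row out) := by unfold Spec_find_right_bounds; infer_instance

-- ===== CLAIM (what is proved, stated in full; the proofs are below) =====
def Claim_equal_find_right_bounds : Prop := ∀ (board : List String) (row : Int), Dom_find_right_bounds board row → Pre_find_right_bounds board row → Spec_find_right_bounds board row (find_right_bounds board row)

-- ===== LEMMAS AND PROOFS =====

-- closed form shared by both loops: stripped-of-trailing-spaces length minus one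
theorem pvALoop_eq (s : List Char) :
    ∀ n, n ≤ s.length →
      pvALoop s n = (((s.take n).reverse.dropWhile (· == ' ')).reverse.length : Int) - 1 := by
  intro n
  induction n with
  | zero => intro _; simp [pvALoop]
  | succ n ih =>
    intro h
    have hn : n < s.length := Nat.lt_of_succ_le h
    have htake : s.take (n + 1) = s.take n ++ [s[n]] := List.take_succ_eq_append_getElem hn
    rw [pvALoop]
    have hget : (PySem.List.pyGet? s (n : Int)).getD ' ' = s[n] := by
      simp [hn]
    by_cases hc : s[n] = ' '
    · simp only [hget, hc, ne_eq, not_true_eq_false, if_false]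
      rw [ih (Nat.le_of_lt hn), htake]
      simp [hc]
    · simp only [hget, ne_eq, hc, not_false_eq_true, if_true, htake, List.reverse_append]
      have hlen : (s.take n).length = n := List.length_take_of_le (Nat.le_of_lt hn)
      simp [hc]
      omega

theorem pvBFold_eq (s : List Char) :
    (PySem.List.enumerate s 0).foldl (fun last p => if p.2 ≠ ' ' then p.1 else last) (-1)
      = ((s.reverse.dropWhile (· == ' ')).reverse.length : Int) - 1 := by
  induction s using List.reverseRecOn with
  | nil => simp [PySem.List.enumerate]
  | append_singleton xs c ih =>
    rw [PySem.List.enumerate_append, List.foldl_append]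
    by_cases hc : c = ' '
    · have h2 : PySem.List.enumerate [c] (0 + (xs.length : Int)) = [((xs.length : Int), c)] := by
        simp [PySem.List.enumerate]
      rw [h2, List.foldl_cons, List.foldl_nil, ih]
      simp [hc]
    · simp [PySem.List.enumerate, hc]

theorem find_right_bounds_spec : Claim_equal_find_right_bounds := by
  intro board row _ hpre
  unfold Spec_find_right_bounds find_right_bounds find_right_bounds_alt
  cases hg : PySem.List.pyGet? board row with
  | none =>
    exfalso
    obtain ⟨h1, h2⟩ := hpre
    have := (PySem.List.pyGet?_eq_none_iff board row).mp hg
    simp [PySem.Raise.InRange] at this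
    omega
  | some r =>
    have hA := pvALoop_eq r.toList r.toList.length (le_refl _)
    rw [List.take_length] at hA
    dsimp only
    rw [hA, pvBFold_eq]
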